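-- pv_equiv track=rewrite | github.com/Leapense/problems | 29602번: Расписание/Расписание.py | schedule_documents
-- ===== SOURCE A (Python) =====
-- def schedule_documents(n, deadlines):
--     indexed_deadlines = [(deadlines[i], i) for i in range(n)]
--
--     indexed_deadlines.sort()
--
--     result = [0] * n
--     current_day = 1
--
--     for deadline, original_index in indexed_deadlines:
--         result[original_index] = current_day
--         current_day += 1
--
--     return result
-- ===== SOURCE B (Python) =====
-- def schedule_documents(n, deadlines):
--     # Rank-counting instead of sorting: the day of document i is one plus the
--     # number of documents whose (deadline, index) key is strictly smaller.
--     return [1 + sum(1 for j in range(n)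
--                     if (deadlines[j], j) < (deadlines[i], i))
--             for i in range(n)]
-- ===== Notes on version B (the rewrite author's own statement) =====
-- stated objective: alternative
-- what changed: Replaces sort-then-sequentially-assign with a direct rank computation: each document's day is 1 plus the count of strictly smaller (deadline, index) keys, so the sort and the mutable result array disappear.
import Mathlib
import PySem

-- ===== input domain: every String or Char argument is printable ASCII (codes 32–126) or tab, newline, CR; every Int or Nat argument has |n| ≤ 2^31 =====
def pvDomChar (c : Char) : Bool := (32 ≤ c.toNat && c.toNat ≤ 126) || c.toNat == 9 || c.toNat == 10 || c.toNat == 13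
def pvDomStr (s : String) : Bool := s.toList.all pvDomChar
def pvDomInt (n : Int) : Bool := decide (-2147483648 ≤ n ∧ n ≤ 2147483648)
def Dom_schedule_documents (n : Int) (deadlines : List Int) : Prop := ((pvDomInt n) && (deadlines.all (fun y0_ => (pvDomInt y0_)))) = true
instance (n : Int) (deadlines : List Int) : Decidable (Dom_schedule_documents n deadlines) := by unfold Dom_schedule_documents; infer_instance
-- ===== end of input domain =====

-- B replaces A's sort-then-sequential-assignment by direct rank counting over (deadline, index) keys: an alternative algorithm with the same results (return-value equivalence).


-- ===== PORT A =====
def schedule_documents (n : Int) (deadlines : List Int) : List Int :=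
  let indexed := (PySem.List.pyRange 0 n 1).map (fun i => (PySem.List.pyGetD deadlines i 0, i))
  let sortedL := PySem.List.sorted2 indexed (fun p => p.1) (fun p => p.2)
  let result : List Int := PySem.List.pyRepeat [0] n
  (sortedL.foldl (fun st p => (PySem.List.pySetD st.1 p.2 st.2, st.2 + 1)) (result, (1 : Int))).1

-- ===== PORT B =====
def schedule_documents_alt (n : Int) (deadlines : List Int) : List Int :=
  (PySem.List.pyRange 0 n 1).map (fun i =>
    1 + ((PySem.List.pyRange 0 n 1).map (fun j =>
        if PySem.List.pyGetD deadlines j 0 < PySem.List.pyGetD deadlines i 0 ∨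
           (PySem.List.pyGetD deadlines j 0 = PySem.List.pyGetD deadlines i 0 ∧ j < i)
        then (1 : Int) else 0)).sum)

-- ===== PRECONDITION & SPEC =====
-- Pre_ excludes exactly the inputs on which Python A raises IndexError: n greater than len(deadlines).
def Pre_schedule_documents (n : Int) (deadlines : List Int) : Prop := n ≤ (deadlines.length : Int)
instance (n : Int) (deadlines : List Int) : Decidable (Pre_schedule_documents n deadlines) := by unfold Pre_schedule_documents; infer_instance
def pvWitness_schedule_documents : Int × List Int := (3, [2, 1, 3])

def Spec_schedule_documents (n : Int) (deadlines : List Int) (out : List Int) : Prop := out = schedule_documents_alt n deadlines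
instance (n : Int) (deadlines : List Int) (out : List Int) : Decidable (Spec_schedule_documents n deadlines out) := by unfold Spec_schedule_documents; infer_instance

-- ===== CLAIM (what is proved, stated in full; the proofs are below) =====
def Claim_equal_schedule_documents : Prop := ∀ (n : Int) (deadlines : List Int), Dom_schedule_documents n deadlines → Pre_schedule_documents n deadlines → Spec_schedule_documents n deadlines (schedule_documents n deadlines)

-- ===== LEMMAS AND PROOFS =====

lemma sorted2_eq_sorted_toLex (xs : List (Int × Int)) :
    PySem.List.sorted2 xs (fun p => p.1) (fun p => p.2) =
    PySem.List.sorted xs (fun p => toLex p) := by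
  have hb : (fun (a b : Int × Int) =>
      decide (a.1 < b.1) || (!decide (b.1 < a.1) && decide (a.2 < b.2)))
      = fun (a b : Int × Int) => decide (toLex a < toLex b) := by
    funext a b
    rw [Bool.eq_iff_iff]
    simp only [Bool.or_eq_true, Bool.and_eq_true, Bool.not_eq_true',
      decide_eq_true_eq, decide_eq_false_iff_not, Prod.Lex.lt_iff, ofLex_toLex]
    omega
  unfold PySem.List.sorted2 PySem.List.sorted
  simp only [if_neg (by simp : ¬ (false = true))]
  rw [hb]

lemma assign_length (S : List (Int × Int)) (r0 : List Int) (day : Int) :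
    ((S.foldl (fun st p => (PySem.List.pySetD st.1 p.2 st.2, st.2 + 1)) (r0, day)).1).length
    = r0.length := by
  induction S generalizing r0 day with
  | nil => rfl
  | cons p T ih => simp only [List.foldl_cons]; rw [ih]; exact PySem.List.length_pySetD r0 p.2 day

lemma assign_getD (S : List (Int × Int)) (r0 : List Int) (day : Int) (m : Nat)
    (hnd : (S.map Prod.snd).Nodup)
    (hS : ∀ p ∈ S, ∃ k : Nat, p.2 = (k : Int) ∧ k < r0.length) :
    PySem.List.pyGetD
      ((S.foldl (fun st p => (PySem.List.pySetD st.1 p.2 st.2, st.2 + 1)) (r0, day)).1)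
      (m : Int) 0
    = match S.findIdx? (fun p => p.2 == (m : Int)) with
      | some k => day + (k : Int)
      | none => PySem.List.pyGetD r0 (m : Int) 0 := by
  induction S generalizing r0 day with
  | nil => simp
  | cons p T ih =>
    obtain ⟨k, hk, hklen⟩ := hS p (by simp)
    simp only [List.map_cons, List.nodup_cons] at hnd
    have hr0' : (PySem.List.pySetD r0 p.2 day).length = r0.length :=
      PySem.List.length_pySetD r0 p.2 day
    have hS' : ∀ q ∈ T, ∃ j : Nat, q.2 = (j : Int) ∧ j < (PySem.List.pySetD r0 p.2 day).length := by
      intro q hq; obtain ⟨j, h1, h2⟩ := hS q (by simp [hq]); exact ⟨j, h1, by omega⟩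
    simp only [List.foldl_cons, List.findIdx?_cons]
    rw [ih (PySem.List.pySetD r0 p.2 day) (day + 1) hnd.2 hS']
    have hget : PySem.List.pyGetD (PySem.List.pySetD r0 p.2 day) (m : Int) 0
        = if m = k then day else PySem.List.pyGetD r0 (m : Int) 0 := by
      rw [hk]; exact PySem.List.pyGetD_pySetD_natCast r0 k m day 0 hklen
    by_cases hpm : p.2 = (m : Int)
    · have hmk : m = k := by omega
      have hnone : T.findIdx? (fun q => q.2 == (m : Int)) = none := by
        rw [List.findIdx?_eq_none_iff]
        intro q hq
        simp only [beq_eq_false_iff_ne, ne_eq]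
        intro hqm
        have hmem : q.2 ∈ T.map Prod.snd := List.mem_map_of_mem hq
        rw [hqm, ← hpm] at hmem
        exact hnd.1 hmem
      rw [hnone, if_pos (by simp [hpm]), hget, if_pos hmk]
      simp
    · rw [if_neg (by simp [hpm])]
      have hmk : m ≠ k := by omega
      cases hfi : T.findIdx? (fun q => q.2 == (m : Int)) with
      | none => rw [hget, if_neg hmk]; rfl
      | some j => simp only [Option.map_some]; push_cast; ring

lemma findIdx?_pairwise (S : List (Int × Int))
    (hp : S.Pairwise (fun a b => toLex a < toLex b))
    (hnd : (S.map Prod.snd).Nodup)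
    {e : Int × Int} (he : e ∈ S) :
    S.findIdx? (fun p => p.2 == e.2)
    = some (S.countP (fun p => decide (toLex p < toLex e))) := by
  induction S with
  | nil => cases he
  | cons q T ih =>
    rw [List.pairwise_cons] at hp
    simp only [List.map_cons, List.nodup_cons] at hnd
    rw [List.findIdx?_cons, List.countP_cons]
    rcases List.mem_cons.mp he with rfl | heT
    · rw [if_pos (by simp)]
      have h0 : T.countP (fun p => decide (toLex p < toLex e)) = 0 := by
        rw [List.countP_eq_zero]
        intro p hpT
        simp only [decide_eq_true_eq]
        exact fun h => absurd (hp.1 p hpT) (lt_asymm h)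
      simp [h0]
    · have hq : q.2 ≠ e.2 := by
        intro h
        exact hnd.1 (h ▸ List.mem_map_of_mem heT)
      rw [if_neg (by simp [hq]), ih hp.2 hnd.2 heT]
      have hqe : decide (toLex q < toLex e) = true := by
        simp [hp.1 e heT]
      simp [hqe]

-- ===== VERDICT (by name: the statement is the Claim_ definition above) =====
theorem schedule_documents_spec : Claim_equal_schedule_documents := by
  intro n deadlines _ _
  unfold Spec_schedule_documents
  unfold schedule_documents schedule_documents_alt
  simp only []
  set f : Int → Int × Int := fun i => (PySem.List.pyGetD deadlines i 0, i) with hf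
  set R := PySem.List.pyRange 0 n 1 with hR
  set L := R.map f with hL
  rw [sorted2_eq_sorted_toLex]
  set S := PySem.List.sorted L (fun p => toLex p) with hS
  set r0 : List Int := PySem.List.pyRepeat [0] n with hr0
  have hr0len : r0.length = n.toNat := by
    rw [hr0, PySem.List.pyRepeat_singleton]; simp
  have hRlen : R.length = n.toNat := by
    rw [hR, PySem.List.length_pyRange_one]; simp
  have hperm : S.Perm L := PySem.List.sorted_perm L _ false
  have hsnd : L.map Prod.snd = R := by
    rw [hL, List.map_map]; simp [Function.comp_def, hf]
  have hndL : (L.map Prod.snd).Nodup := by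
    rw [hsnd]; exact PySem.List.nodup_pyRange_one 0 n
  have hLnd : L.Nodup := List.Nodup.of_map _ hndL
  have hndS : (S.map Prod.snd).Nodup := ((hperm.map Prod.snd).nodup_iff).mpr hndL
  have hSnd : S.Nodup := hperm.nodup_iff.mpr hLnd
  have hpair : S.Pairwise (fun a b => toLex a < toLex b) := by
    have hle : S.Pairwise (fun a b => toLex a ≤ toLex b) := by
      rw [hS]; exact PySem.List.sorted_pairwise L _
    exact (hle.and hSnd).imp (fun {a b} h =>
      lt_of_le_of_ne h.1 (fun hc => h.2 (toLex.injective hc)))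
  have hSmem : ∀ p ∈ S, ∃ k : Nat, p.2 = (k : Int) ∧ k < r0.length := by
    intro p hp
    have hpL : p ∈ L := hperm.mem_iff.mp hp
    obtain ⟨i, hiR, rfl⟩ := List.mem_map.mp hpL
    have hi := PySem.List.mem_pyRange_one.mp hiR
    exact ⟨i.toNat, by simp [hf]; omega, by omega⟩
  have hsum : ∀ (i : Int),
      ((R.map (fun j => if PySem.List.pyGetD deadlines j 0 < PySem.List.pyGetD deadlines i 0 ∨
           (PySem.List.pyGetD deadlines j 0 = PySem.List.pyGetD deadlines i 0 ∧ j < i)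
        then (1 : Int) else 0)).sum)
      = ((R.countP (fun j => decide (toLex (f j) < toLex (f i)))) : Int) := by
    intro i
    rw [← PySem.List.sum_map_ite_one_zero (fun j => decide (toLex (f j) < toLex (f i))) R]
    congr 1
    apply List.map_congr_left
    intro j _
    have : (toLex (f j) < toLex (f i)) ↔
        (PySem.List.pyGetD deadlines j 0 < PySem.List.pyGetD deadlines i 0 ∨
         (PySem.List.pyGetD deadlines j 0 = PySem.List.pyGetD deadlines i 0 ∧ j < i)) := by
      simp [Prod.Lex.lt_iff, hf]
    simp only [this, decide_eq_true_eq]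
  apply List.ext_getElem
  · rw [assign_length, hr0len, List.length_map, hRlen]
  · intro m h1 h2
    rw [assign_length, hr0len] at h1
    -- left side
    have hA := assign_getD S r0 1 m hndS hSmem
    have hmR : (m : Int) ∈ R := by
      rw [hR]; exact PySem.List.mem_pyRange_one.mpr (by omega)
    have heS : f (m : Int) ∈ S := hperm.mem_iff.mpr (List.mem_map_of_mem hmR)
    have hfind := findIdx?_pairwise S hpair hndS heS
    have hsnd_e : (f (m : Int)).2 = (m : Int) := by simp [hf]
    rw [hsnd_e] at hfind
    rw [hfind] at hA
    have hcount : S.countP (fun p => decide (toLex p < toLex (f (m : Int))))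
        = R.countP (fun j => decide (toLex (f j) < toLex (f (m : Int)))) := by
      rw [hperm.countP_eq, hL, List.countP_map]; rfl
    -- convert pyGetD to getElem on the left
    rw [PySem.List.pyGetD_natCast, List.getD_eq_getElem _ _ (by rw [assign_length, hr0len]; exact h1)] at hA
    rw [hA, hcount]
    -- right side
    rw [List.getElem_map, PySem.List.getElem_pyRange_one 0 n m (by rw [PySem.List.length_pyRange_one]; simp; omega)]
    simp only [zero_add]
    rw [hsum (m : Int)]
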